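-- pv_equiv track=rewrite | github.com/bashtag/Algorithms | some_short_algorithms.py | soldier
-- ===== SOURCE A (Python) =====
-- def soldier(o_team: list[int], e_team: list[int]):
--
-- 	result = []
--
-- 	for soldier in e_team:
-- 		counter = 0
-- 		for other in o_team:
-- 			if soldier > other:
-- 				counter += 1
-- 		result.append(counter)
--
-- 	result.sort()
--
-- 	return result
-- ===== SOURCE B (Python) =====
-- def soldier(o_team: list[int], e_team: list[int]):
--     so = sorted(o_team)
--     res = []
--     i = 0
--     for s in sorted(e_team):
--         while i < len(so) and so[i] < s:
--             i += 1
--         res.append(i)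
--     return res
-- ===== Notes on version B (the rewrite author's own statement) =====
-- stated objective: faster
-- what changed: Replaced the O(n*m) nested counting loops plus final sort by sorting both lists once and a single two-pointer merge that emits the counts already in sorted order.
import Mathlib
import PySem

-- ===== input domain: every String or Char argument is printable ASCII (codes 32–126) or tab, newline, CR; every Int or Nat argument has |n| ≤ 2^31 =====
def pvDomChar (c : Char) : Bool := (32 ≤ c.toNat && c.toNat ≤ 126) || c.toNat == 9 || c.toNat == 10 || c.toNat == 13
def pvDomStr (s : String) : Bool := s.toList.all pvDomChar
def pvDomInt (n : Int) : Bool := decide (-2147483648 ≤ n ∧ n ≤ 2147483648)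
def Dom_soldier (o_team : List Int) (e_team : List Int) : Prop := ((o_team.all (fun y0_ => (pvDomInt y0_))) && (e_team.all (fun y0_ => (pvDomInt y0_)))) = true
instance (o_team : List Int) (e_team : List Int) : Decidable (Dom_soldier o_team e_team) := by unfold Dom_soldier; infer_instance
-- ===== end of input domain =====

-- B replaces A's O(n·m) nested counting loops + final sort by sorting both lists and one
-- two-pointer merge emitting the counts already in order (objective: faster, asymptotic).

-- ===== PORT A =====
def soldier (o_team : List Int) (e_team : List Int) : List Int :=
  PySem.List.sorted
    (e_team.foldl
      (fun result s =>
        result ++ [o_team.foldl (fun counter other => if s > other then counter + 1 else counter) (0 : Int)])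
      [])
    (fun x => x) false

-- ===== PORT B =====
-- the inner 'while i < len(so) and so[i] < s: i += 1' loop of Source B
def soldierAdv (so : List Int) (s : Int) (i : Nat) : Nat :=
  if h : i < so.length then
    if so[i] < s then soldierAdv so s (i + 1) else i
  else i
termination_by so.length - i

def soldier_alt (o_team : List Int) (e_team : List Int) : List Int :=
  ((PySem.List.sorted e_team (fun x => x) false).foldl
    (fun (st : Nat × List Int) s =>
      (soldierAdv (PySem.List.sorted o_team (fun x => x) false) s st.1,
       st.2 ++ [(soldierAdv (PySem.List.sorted o_team (fun x => x) false) s st.1 : Int)]))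
    (0, [])).2

-- ===== PRECONDITION & SPEC =====
def Spec_soldier (o_team : List Int) (e_team : List Int) (out : List Int) : Prop := out = soldier_alt o_team e_team
instance (o_team : List Int) (e_team : List Int) (out : List Int) : Decidable (Spec_soldier o_team e_team out) := by unfold Spec_soldier; infer_instance

-- ===== CLAIM (what is proved, stated in full; the proofs are below) =====
def Claim_equal_soldier : Prop := ∀ (o_team : List Int) (e_team : List Int), Dom_soldier o_team e_team → Spec_soldier o_team e_team (soldier o_team e_team)

-- ===== LEMMAS AND PROOFS =====

-- If the first i elements all satisfy p, takeWhile passes them and continues on the rest.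
theorem takeWhile_split (p : Int → Bool) : ∀ (so : List Int) (i : Nat),
    (∀ x ∈ so.take i, p x = true) →
    so.takeWhile p = so.take i ++ (so.drop i).takeWhile p := by
  intro so
  induction so with
  | nil => intro i _; simp
  | cons a t ih =>
    intro i h
    cases i with
    | zero => simp
    | succ j =>
      have ha : p a = true := h a (by simp)
      simp only [List.take_succ_cons, List.drop_succ_cons, List.takeWhile_cons, ha]
      simp [ih j (fun x hx => h x (by simp [hx]))]

-- the while-loop advances the pointer across exactly the takeWhile (< s) prefix of the rest
theorem soldierAdv_eq (so : List Int) (s : Int) : ∀ (n i : Nat), so.length - i ≤ n →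
    soldierAdv so s i = i + ((so.drop i).takeWhile (fun x => decide (x < s))).length := by
  intro n
  induction n with
  | zero =>
    intro i hi
    have hle : so.length ≤ i := by omega
    rw [soldierAdv]
    simp [List.drop_eq_nil_of_le hle, Nat.not_lt.mpr hle]
  | succ m ih =>
    intro i hi
    rw [soldierAdv]
    by_cases h : i < so.length
    · rw [List.drop_eq_getElem_cons h]
      by_cases hlt : so[i] < s
      · simp only [h, hlt, dif_pos, if_pos, List.takeWhile_cons]
        rw [ih (i + 1) (by omega)]
        simp; omega
      · simp [h, hlt]
    · have hle : so.length ≤ i := by omega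
      simp [List.drop_eq_nil_of_le hle, h]

-- in a sorted list, counting (< s) is the length of the takeWhile (< s) prefix
theorem countP_eq_takeWhile_length (s : Int) : ∀ (so : List Int),
    so.Pairwise (· ≤ ·) →
    so.countP (fun x => decide (x < s)) = (so.takeWhile (fun x => decide (x < s))).length := by
  intro so
  induction so with
  | nil => simp
  | cons a t ih =>
    intro h
    rcases List.pairwise_cons.mp h with ⟨hall, ht⟩
    by_cases ha : a < s
    · simp [ha, ih ht]
    · have : t.countP (fun x => decide (x < s)) = 0 := by
        rw [List.countP_eq_zero]
        intro x hx
        simp only [decide_eq_true_eq]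
        exact fun hxs => ha (lt_of_le_of_lt (hall x hx) hxs)
      simp [ha, this]

-- B's fold over the sorted enemies computes the counts, carrying the pointer
theorem loop_spec (so : List Int) (hs : so.Pairwise (· ≤ ·)) :
    ∀ (se : List Int) (i : Nat) (acc : List Int),
    i ≤ so.length →
    (∀ s ∈ se, ∀ x ∈ so.take i, x < s) →
    se.Pairwise (· ≤ ·) →
    (se.foldl
      (fun (st : Nat × List Int) s => (soldierAdv so s st.1, st.2 ++ [(soldierAdv so s st.1 : Int)]))
      (i, acc)).2
    = acc ++ se.map (fun s => (so.countP (fun x => decide (x < s)) : Int)) := by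
  intro se
  induction se with
  | nil => intro i acc _ _ _; simp
  | cons s rest ih =>
    intro i acc hile hinv hpw
    rcases List.pairwise_cons.mp hpw with ⟨hrest, hpw'⟩
    have hpre : ∀ x ∈ so.take i, (fun x => decide (x < s)) x = true := by
      intro x hx; simpa using hinv s (by simp) x hx
    have hadv : soldierAdv so s i = so.countP (fun x => decide (x < s)) := by
      rw [soldierAdv_eq so s (so.length - i) i le_rfl,
          countP_eq_takeWhile_length s so hs, takeWhile_split _ so i hpre]
      simp [Nat.min_eq_left hile]
    have hcle : so.countP (fun x => decide (x < s)) ≤ so.length := List.countP_le_length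
    have htake : so.take (so.countP (fun x => decide (x < s))) = so.takeWhile (fun x => decide (x < s)) := by
      rw [countP_eq_takeWhile_length s so hs]
      obtain ⟨t, ht⟩ := List.takeWhile_prefix (fun x => decide (x < s)) (l := so)
      calc so.take ((so.takeWhile (fun x => decide (x < s))).length)
          = (so.takeWhile (fun x => decide (x < s)) ++ t).take ((so.takeWhile (fun x => decide (x < s))).length) := by rw [ht]
        _ = so.takeWhile (fun x => decide (x < s)) := by simp
    simp only [List.foldl_cons, hadv]
    rw [ih _ _ hcle ?_ hpw']
    · simp
    · intro s'' hs'' x hx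
      rw [htake] at hx
      have hxs : x < s := by simpa using List.mem_takeWhile_imp hx
      exact lt_of_lt_of_le hxs (hrest s'' hs'')

-- ===== VERDICT (by name: the statement is the Claim_ definition above) =====
theorem soldier_spec : Claim_equal_soldier := by
  intro o_team e_team _
  unfold Spec_soldier soldier soldier_alt
  -- A's outer loop is a map, its inner loop a countP
  rw [PySem.List.foldl_append_singleton_eq_map]
  have hinner : ∀ s : Int,
      o_team.foldl (fun counter other => if s > other then counter + 1 else counter) (0 : Int)
      = (o_team.countP (fun x => decide (x < s)) : Int) := by
    intro s
    rw [PySem.List.foldl_ite_add_one (fun other => s > other)]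
    simp [gt_iff_lt]
  -- B's merge over sorted inputs
  have hsortedo : (PySem.List.sorted o_team (fun x => x) false).Pairwise (· ≤ ·) :=
    PySem.List.sorted_pairwise o_team (fun x => x)
  rw [loop_spec (PySem.List.sorted o_team (fun x => x) false) hsortedo
        (PySem.List.sorted e_team (fun x => x) false) 0 [] (Nat.zero_le _)
        (by intro s _ x hx; simp at hx)
        (PySem.List.sorted_pairwise e_team (fun x => x))]
  simp only [List.nil_append]
  -- counts over o_team equal counts over sorted o_team (permutation)
  have hperm : (PySem.List.sorted o_team (fun x => x) false).Perm o_team :=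
    PySem.List.sorted_perm o_team (fun x => x) false
  have hcnt : ∀ s : Int,
      (PySem.List.sorted o_team (fun x => x) false).countP (fun x => decide (x < s))
      = o_team.countP (fun x => decide (x < s)) := fun s => hperm.countP_eq _
  -- A's sorted output IS B's list: name the order with sorted_id_eq_of_perm_of_pairwise
  apply PySem.List.sorted_id_eq_of_perm_of_pairwise
  · calc ((PySem.List.sorted e_team (fun x => x) false).map
            (fun s => ((PySem.List.sorted o_team (fun x => x) false).countP (fun x => decide (x < s)) : Int))).Perm
          (e_team.map (fun s => ((PySem.List.sorted o_team (fun x => x) false).countP (fun x => decide (x < s)) : Int))) :=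
            (PySem.List.sorted_perm e_team (fun x => x) false).map _
      _ = e_team.map (fun s =>
            o_team.foldl (fun counter other => if s > other then counter + 1 else counter) (0 : Int)) := by
            simp only [hcnt, hinner]
  · refine List.Pairwise.map _ ?_ (PySem.List.sorted_pairwise e_team (fun x => x))
    intro a b hab
    exact_mod_cast List.countP_mono_left (fun x _ hx => by
      simp only [decide_eq_true_eq] at hx ⊢; omega)
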